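-- pv_equiv track=rewrite | github.com/yoonseokham/algorithm | programmers/프로그래머스_방금그곡.py | solution
-- ===== SOURCE A (Python) =====
-- def minReturn(start:str,end:str)->int:
--     startH,startM=map(int,start.split(":"))
--     endH,endM=map(int,end.split(":"))
--     return endH*60+endM-startH*60-startM+1
--
-- def playedMusicCal(info:str,playTime:int)->str:
--     playedMusic=[]
--     i=0
--     while i<playTime:
--         playedMusic.append(info[i%len(info)])
--         i+=1
--     return "".join(playedMusic)
--
-- def Convert(temp:str)->str:
--     num=["C#","D#","F#","G#","A#"]
--     for i,j in enumerate(num):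
--         temp=temp.replace(j,str(i))
--     return temp
--
-- def solution(m, musicinfos):
--     answerSpace=[]
--     m=Convert(m)
--     for i in musicinfos:
--         temp=i.split(",")
--         answerSpace.append((temp[2],playedMusicCal(Convert(temp[3]),minReturn(temp[0],temp[1]))))
--     answerSpace=[i for i in answerSpace if m in i[1]]
--     answerSpace.sort(key=lambda x: len(x[1]),reverse=True)
--     answerSpace.append(("(None)","cc"))
--     return  answerSpace[0][0]
-- ===== SOURCE B (Python) =====
-- def minReturn(start: str, end: str) -> int:
--     startH, startM = map(int, start.split(":"))
--     endH, endM = map(int, end.split(":"))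
--     return endH * 60 + endM - startH * 60 - startM + 1
--
-- def Convert(temp: str) -> str:
--     num = ["C#", "D#", "F#", "G#", "A#"]
--     for i, j in enumerate(num):
--         temp = temp.replace(j, str(i))
--     return temp
--
-- def playedMusicCal(info: str, playTime: int) -> str:
--     # whole repetitions plus a prefix, instead of a char-by-char loop
--     if playTime <= 0:
--         return ""
--     q, r = divmod(playTime, len(info))
--     return info * q + info[:r]
--
-- def solution(m, musicinfos):
--     m = Convert(m)
--     bestTitle = "(None)"
--     bestLen = -1
--     for entry in musicinfos:
--         temp = entry.split(",")
--         played = playedMusicCal(Convert(temp[3]), minReturn(temp[0], temp[1]))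
--         if m in played and len(played) > bestLen:
--             bestTitle, bestLen = temp[2], len(played)
--     return bestTitle
-- ===== Notes on version B (the rewrite author's own statement) =====
-- stated objective: simpler
-- what changed: B replaces A's collect-all-pairs, filter, stable reverse-sort and sentinel-append pipeline by a single running-max pass over musicinfos (updating only on strictly greater played length, which matches the stable sort's tie-breaking), and builds the played melody by whole repetitions plus a prefix slice instead of a character-by-character while loop.
import Mathlib
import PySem

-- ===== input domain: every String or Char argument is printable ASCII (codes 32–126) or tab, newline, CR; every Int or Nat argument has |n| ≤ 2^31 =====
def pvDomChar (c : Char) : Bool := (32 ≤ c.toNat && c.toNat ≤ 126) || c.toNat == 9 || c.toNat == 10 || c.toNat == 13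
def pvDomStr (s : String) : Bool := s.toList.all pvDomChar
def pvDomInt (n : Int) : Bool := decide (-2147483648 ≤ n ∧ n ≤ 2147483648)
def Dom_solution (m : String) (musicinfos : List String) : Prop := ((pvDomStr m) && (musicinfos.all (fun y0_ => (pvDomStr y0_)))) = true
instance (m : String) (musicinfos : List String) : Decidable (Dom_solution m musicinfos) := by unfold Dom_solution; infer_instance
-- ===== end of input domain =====

-- B replaces A's collect-filter-sort-then-pick pipeline by a single running-max pass (strictly-greater
-- updates preserve A's stable-sort tie-breaking) and builds the played melody by repetition plus a
-- prefix slice instead of a char-by-char loop; equivalence is claimed on inputs where A raises nothing.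

-- ===== PORT A =====
-- s.split(sep) for the nonempty literal separators used here (the getD [] default is dead: sep ≠ "")
def pySplit (s sep : String) : List String := (PySem.Str.split? s sep).getD []

-- shared helper: Convert (identical source in A and in Source B)
def ConvertP (temp : String) : String :=
  (PySem.List.enumerate ["C#", "D#", "F#", "G#", "A#"]).foldl
    (fun t ij => PySem.Str.replace t ij.2 (PySem.Int.toStr ij.1)) temp

-- shared helper: minReturn (identical source in A and in Source B); the `_ => 0` / `.getD 0` defaults
-- are dead under Pre_ (Python raises ValueError exactly there)
def minReturnP (start e : String) : Int :=
  match pySplit start ":" with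
  | [sh, sm] =>
    match pySplit e ":" with
    | [eh, em] =>
      ((PySem.Int.ofStr? eh).getD 0) * 60 + ((PySem.Int.ofStr? em).getD 0)
        - ((PySem.Int.ofStr? sh).getD 0) * 60 - ((PySem.Int.ofStr? sm).getD 0) + 1
    | _ => 0
  | _ => 0

-- A's playedMusicCal: while loop appending info[i % len(info)]; "".join over single chars is
-- String.ofList; the pyGetD default is dead under Pre_ (Python raises ZeroDivisionError exactly there)
def playedMusicCalA (info : String) (playTime : Int) : String :=
  let cs := info.toList
  String.ofList ((List.range playTime.toNat).foldl
    (fun acc (i : Nat) => acc ++ [PySem.List.pyGetD cs (PySem.Int.mod (i : Int) (cs.length : Int)) ' ']) [])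

def solution (m : String) (musicinfos : List String) : String :=
  let mC := ConvertP m
  let answerSpace := musicinfos.foldl (fun acc i =>
      let temp := pySplit i ","
      acc ++ [(PySem.List.pyGetD temp 2 "",
               playedMusicCalA (ConvertP (PySem.List.pyGetD temp 3 ""))
                 (minReturnP (PySem.List.pyGetD temp 0 "") (PySem.List.pyGetD temp 1 "")))]) []
  let answerSpace2 := answerSpace.filter (fun x => PySem.Str.isIn mC x.2)
  let answerSpace3 := PySem.List.sorted answerSpace2 (fun x => PySem.Str.len x.2) true
  let answerSpace4 := answerSpace3 ++ [(("(None)" : String), ("cc" : String))]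
  (answerSpace4.headD ("", "")).1

-- ===== PORT B =====
-- B's playedMusicCal: whole repetitions (info * q) plus a prefix slice (info[:r]), q, r = divmod(playTime, len(info))
def playedMusicCalB (info : String) (playTime : Int) : String :=
  if playTime ≤ 0 then "" else
  let cs := info.toList
  let q := PySem.Int.floordiv playTime (cs.length : Int)
  let r := PySem.Int.mod playTime (cs.length : Int)
  String.ofList ((List.replicate q.toNat cs).flatten ++ PySem.List.slice cs none (some r))

def solution_alt (m : String) (musicinfos : List String) : String :=
  let mC := ConvertP m
  (musicinfos.foldl (fun st entry =>
      let temp := pySplit entry ","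
      let played := playedMusicCalB (ConvertP (PySem.List.pyGetD temp 3 ""))
                      (minReturnP (PySem.List.pyGetD temp 0 "") (PySem.List.pyGetD temp 1 ""))
      if PySem.Str.isIn mC played && decide (st.2 < PySem.Str.len played)
      then (PySem.List.pyGetD temp 2 "", PySem.Str.len played) else st)
    (("(None)" : String), (-1 : Int))).1

-- ===== PRECONDITION & SPEC =====
-- Pre_ excludes exactly the inputs where the Python A raises: an entry with fewer than 4
-- comma-fields (IndexError), a time field that is not two ':'-separated int()-parseable pieces
-- (ValueError on unpack/int), or a positive play time with an empty melody sheet (ZeroDivisionError).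
def preOk (s : String) : Bool :=
  let temp := pySplit s ","
  decide (4 ≤ temp.length) &&
  (match pySplit (PySem.List.pyGetD temp 0 "") ":", pySplit (PySem.List.pyGetD temp 1 "") ":" with
   | [sh, sm], [eh, em] =>
     match PySem.Int.ofStr? sh, PySem.Int.ofStr? sm, PySem.Int.ofStr? eh, PySem.Int.ofStr? em with
     | some a, some b, some c, some d =>
         decide (c * 60 + d - a * 60 - b + 1 ≤ 0) || decide (PySem.List.pyGetD temp 3 "" ≠ "")
     | _, _, _, _ => false
   | _, _ => false)

def Pre_solution (m : String) (musicinfos : List String) : Prop :=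
  musicinfos.all preOk = true
instance (m : String) (musicinfos : List String) : Decidable (Pre_solution m musicinfos) := by
  unfold Pre_solution; infer_instance

def pvWitness_solution : String × List String :=
  ("ABC", ["12:00,12:03,WORLD,C#ABCEF", "11:57,12:02,HELLO,ABCDE"])

def Spec_solution (m : String) (musicinfos : List String) (out : String) : Prop := out = solution_alt m musicinfos
instance (m : String) (musicinfos : List String) (out : String) : Decidable (Spec_solution m musicinfos out) := by unfold Spec_solution; infer_instance

-- ===== CLAIM (what is proved, stated in full; the proofs are below) =====
def Claim_equal_solution : Prop := ∀ (m : String) (musicinfos : List String), Dom_solution m musicinfos → Pre_solution m musicinfos → Spec_solution m musicinfos (solution m musicinfos)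

-- ===== LEMMAS AND PROOFS =====

-- Chars.replace keeps a nonempty string nonempty (its accumulator never empties)
lemma replace_go_ne_nil (old new : List Char) (fuel : Nat) (l acc : List Char) (hacc : acc ≠ []) :
    PySem.Chars.replace.go old new fuel l acc ≠ [] := by
  induction fuel generalizing l acc with
  | zero => simp [PySem.Chars.replace.go, hacc]
  | succ n ih =>
    cases l with
    | nil => simp [PySem.Chars.replace.go, hacc]
    | cons c t =>
      rw [PySem.Chars.replace.go]
      split
      · exact ih _ _ (by simp [hacc])
      · exact ih _ _ (by simp)

lemma chars_replace_ne_nil (cs old new : List Char) (h : cs ≠ []) (hnew : new ≠ []) :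
    PySem.Chars.replace cs old new ≠ [] := by
  rw [PySem.Chars.replace]
  split
  · cases cs with
    | nil => exact absurd rfl h
    | cons c t => simp [hnew]
  · cases cs with
    | nil => exact absurd rfl h
    | cons c t =>
      simp only [List.length_cons]
      rw [PySem.Chars.replace.go]
      split
      · exact replace_go_ne_nil _ _ _ _ _ (by simp [hnew])
      · exact replace_go_ne_nil _ _ _ _ _ (by simp)

lemma replace_toList_ne_nil (s old new : String) (hs : s.toList ≠ []) (hnew : new.toList ≠ []) :
    (PySem.Str.replace s old new).toList ≠ [] := by
  rw [PySem.Str.toList_replace]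
  exact chars_replace_ne_nil _ _ _ hs hnew

lemma convert_toList_ne_nil (s : String) (hs : s.toList ≠ []) : (ConvertP s).toList ≠ [] := by
  simp only [ConvertP, PySem.List.enumerate_cons, PySem.List.enumerate_nil, List.foldl_cons,
    List.foldl_nil]
  exact replace_toList_ne_nil _ _ _ (replace_toList_ne_nil _ _ _ (replace_toList_ne_nil _ _ _
    (replace_toList_ne_nil _ _ _ (replace_toList_ne_nil _ _ _ hs (by decide)) (by decide))
    (by decide)) (by decide)) (by decide)

-- the cyclic melody of length N equals whole copies of the sheet plus a prefix
lemma cycle_map (cs : List Char) (hL : cs ≠ []) (N : Nat) :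
    (List.range N).map (fun i => cs.getD (i % cs.length) ' ') =
      (List.replicate (N / cs.length) cs).flatten ++ cs.take (N % cs.length) := by
  have hL0 : 0 < cs.length := List.length_pos_of_ne_nil hL
  induction N with
  | zero => simp [Nat.div_eq_of_lt hL0]
  | succ n ih =>
    have e1 := Nat.div_add_mod' n cs.length
    have l1 := Nat.mod_lt n hL0
    rw [List.range_succ, List.map_append, ih]
    have hstep : cs.take (n % cs.length) ++ [cs.getD (n % cs.length) ' ']
        = cs.take (n % cs.length + 1) := by
      rw [List.take_add_one, List.getElem?_eq_getElem (by omega : n % cs.length < cs.length)]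
      simp [List.getD, List.getElem?_eq_getElem (by omega : n % cs.length < cs.length)]
    by_cases h : n % cs.length + 1 = cs.length
    · have hn1 : n + 1 = 0 + (n / cs.length + 1) * cs.length := by
        rw [Nat.succ_mul]; omega
      have hd : (n+1) / cs.length = n / cs.length + 1 := by
        rw [hn1, Nat.add_mul_div_right _ _ hL0, Nat.div_eq_of_lt hL0]; omega
      have hm : (n+1) % cs.length = 0 := by
        rw [hn1, Nat.add_mul_mod_self_right, Nat.mod_eq_of_lt hL0]
      rw [hd, hm, List.replicate_succ', List.flatten_append]
      simp only [List.map_singleton, List.append_assoc, hstep, h, List.take_length]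
      simp
    · have hn1 : n + 1 = (n % cs.length + 1) + (n / cs.length) * cs.length := by omega
      have hd : (n+1) / cs.length = n / cs.length := by
        rw [hn1, Nat.add_mul_div_right _ _ hL0, Nat.div_eq_of_lt (by omega)]; omega
      have hm : (n+1) % cs.length = n % cs.length + 1 := by
        rw [hn1, Nat.add_mul_mod_self_right, Nat.mod_eq_of_lt (by omega)]
      rw [hd, hm, ← hstep]
      simp

-- the two melody builders agree whenever Python does not raise
lemma played_eq (info : String) (pt : Int) (h : info.toList ≠ [] ∨ pt ≤ 0) :
    playedMusicCalA info pt = playedMusicCalB info pt := by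
  by_cases hpt : pt ≤ 0
  · have : pt.toNat = 0 := by omega
    simp [playedMusicCalA, playedMusicCalB, hpt, this]
  · have hcs : info.toList ≠ [] := h.resolve_right hpt
    have hN : pt = ((pt.toNat : Nat) : Int) := by omega
    set cs := info.toList with hdef
    rw [playedMusicCalA, playedMusicCalB, if_neg hpt]
    simp only []
    rw [show PySem.Int.floordiv pt (cs.length : Int) = ((pt.toNat / cs.length : Nat) : Int) from by
      rw [hN]; exact PySem.Int.floordiv_natCast _ _]
    rw [show PySem.Int.mod pt (cs.length : Int) = ((pt.toNat % cs.length : Nat) : Int) from by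
      rw [hN]; exact PySem.Int.mod_natCast _ _]
    rw [PySem.List.slice_to _ (by positivity)]
    simp only [Int.toNat_natCast]
    rw [PySem.List.foldl_append_singleton_eq_map
      (fun (i : Nat) => PySem.List.pyGetD cs (PySem.Int.mod (i : Int) (cs.length : Int)) ' ')]
    simp only [List.nil_append]
    congr 1
    have hf : (fun (i : Nat) => PySem.List.pyGetD cs (PySem.Int.mod (i : Int) (cs.length : Int)) ' ')
         = (fun i => cs.getD (i % cs.length) ' ') := by
      funext i
      rw [PySem.Int.mod_natCast, PySem.List.pyGetD_natCast]
    rw [hf, cycle_map cs hcs]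

-- one step of A's insertion sort, seen only at the head of the accumulator
def optStep (b : Option (String × String)) (x : String × String) : Option (String × String) :=
  some (match b with
        | none => x
        | some y => if decide (PySem.Str.len y.2 < PySem.Str.len x.2) then x else y)

lemma head?_insertBy_len (x : String × String) (acc : List (String × String)) :
    (PySem.List.insertBy (fun a b => decide (PySem.Str.len b.2 < PySem.Str.len a.2)) x acc).head? =
      optStep acc.head? x := by
  cases acc with
  | nil => simp [PySem.List.insertBy, optStep]
  | cons y ys =>
    rw [PySem.List.insertBy]
    by_cases h : y.2.length < x.2.length <;> simp [h, optStep]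

lemma head?_foldl_insertBy_len (l acc : List (String × String)) :
    (l.foldl (fun a x =>
        PySem.List.insertBy (fun a b => decide (PySem.Str.len b.2 < PySem.Str.len a.2)) x a)
      acc).head? = l.foldl optStep acc.head? := by
  induction l generalizing acc with
  | nil => rfl
  | cons x xs ih =>
    simp only [List.foldl_cons]
    rw [ih, head?_insertBy_len]

-- A's running head (first element of strictly maximal length) equals B's (title, best length) fold
lemma fold_rel (P : String × String → Bool) (l : List (String × String))
    (hP : ∀ x ∈ l, P x = true) (b : Option (String × String)) (st : String × Int)
    (hR : (b = none ∧ st = (("(None)" : String), (-1 : Int))) ∨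
          (∃ p, b = some p ∧ st = (p.1, PySem.Str.len p.2))) :
    (match l.foldl optStep b with
     | none => ("(None)" : String)
     | some p => p.1) =
    (l.foldl (fun st x =>
        if P x && decide (st.2 < PySem.Str.len x.2) then (x.1, PySem.Str.len x.2) else st) st).1 := by
  induction l generalizing b st with
  | nil =>
    rcases hR with ⟨hb, hst⟩ | ⟨p, hb, hst⟩ <;> simp [hb, hst]
  | cons x xs ih =>
    have hx : P x = true := hP x List.mem_cons_self
    simp only [List.foldl_cons]
    apply ih (fun y hy => hP y (List.mem_cons_of_mem _ hy))
    rcases hR with ⟨hb, hst⟩ | ⟨p, hb, hst⟩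
    · subst hb; subst hst
      right
      exact ⟨x, rfl, by simp [hx]; omega⟩
    · subst hb; subst hst
      by_cases hc : p.2.length < x.2.length
      · right
        exact ⟨x, by simp [optStep]; intro h; exact absurd h (by omega), by simp [hx, hc]⟩
      · right
        exact ⟨p, by simp [optStep]; intro h; exact absurd h (by omega), by simp [hx, hc]⟩

-- the heart of the equivalence: sort-descending-then-pick-head = one running-max pass
lemma main_list (P : String × String → Bool) (pairs : List (String × String)) :
    ((PySem.List.sorted (pairs.filter P) (fun x => PySem.Str.len x.2) true
        ++ [(("(None)" : String), ("cc" : String))]).headD ("", "")).1 =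
      (pairs.foldl (fun st p =>
          if P p && decide (st.2 < PySem.Str.len p.2) then (p.1, PySem.Str.len p.2) else st)
        (("(None)" : String), (-1 : Int))).1 := by
  have hsplit : (fun (st : String × Int) (p : String × String) =>
        if P p && decide (st.2 < PySem.Str.len p.2) then (p.1, PySem.Str.len p.2) else st)
      = (fun st p => if P p then
          (if P p && decide (st.2 < PySem.Str.len p.2) then (p.1, PySem.Str.len p.2) else st)
        else st) := by
    funext st p
    by_cases hp : P p <;> simp [hp]
  rw [hsplit, ← List.foldl_filter]
  set filt := pairs.filter P with hfilt
  have hP : ∀ x ∈ filt, P x = true := fun x hx => (List.mem_filter.mp hx).2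
  have hsort := PySem.List.sorted_rev_eq_foldl_insertBy filt (fun x => PySem.Str.len x.2)
  have hh := head?_foldl_insertBy_len filt []
  rw [← hsort] at hh
  have hfr := fold_rel P filt hP none (("(None)" : String), (-1 : Int)) (Or.inl ⟨rfl, rfl⟩)
  rw [← hfr]
  simp only [List.head?_nil] at hh
  cases hs : (PySem.List.sorted filt (fun x => PySem.Str.len x.2) true) with
  | nil => rw [hs] at hh; rw [← hh]; simp
  | cons q t => rw [hs] at hh; rw [← hh]; simp

-- an admitted entry either has a non-positive play time or a nonempty converted sheet
lemma preOk_played_hyp (i : String) (h : preOk i = true) :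
    (ConvertP (PySem.List.pyGetD (pySplit i ",") 3 "")).toList ≠ [] ∨
      minReturnP (PySem.List.pyGetD (pySplit i ",") 0 "")
        (PySem.List.pyGetD (pySplit i ",") 1 "") ≤ 0 := by
  unfold preOk at h
  simp only [Bool.and_eq_true, decide_eq_true_eq] at h
  obtain ⟨h4, hm⟩ := h
  set temp := pySplit i "," with htemp
  rcases hs0 : pySplit (PySem.List.pyGetD temp 0 "") ":" with _ | ⟨sh, _ | ⟨sm, _ | _⟩⟩ <;>
    rw [hs0] at hm <;> try simp at hm
  rcases hs1 : pySplit (PySem.List.pyGetD temp 1 "") ":" with _ | ⟨eh, _ | ⟨em, _ | _⟩⟩ <;>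
    rw [hs1] at hm <;> try simp at hm
  rcases ha : PySem.Int.ofStr? sh with _ | a <;> rw [ha] at hm <;> try simp at hm
  rcases hb : PySem.Int.ofStr? sm with _ | b <;> rw [hb] at hm <;> try simp at hm
  rcases hc : PySem.Int.ofStr? eh with _ | c <;> rw [hc] at hm <;> try simp at hm
  rcases hd : PySem.Int.ofStr? em with _ | d <;> rw [hd] at hm <;> try simp at hm
  have hmin : minReturnP (PySem.List.pyGetD temp 0 "") (PySem.List.pyGetD temp 1 "")
      = c * 60 + d - a * 60 - b + 1 := by
    unfold minReturnP
    rw [hs0, hs1]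
    simp [ha, hb, hc, hd]
  rcases hm with hle | hne
  · right; rw [hmin]; omega
  · left
    apply convert_toList_ne_nil
    intro hnil
    apply hne
    have := congrArg String.ofList hnil
    simpa using this

-- ===== VERDICT (by name: the statement is the Claim_ definition above) =====
theorem solution_spec : Claim_equal_solution := by
  intro m musicinfos _hdom hpre
  unfold Spec_solution solution solution_alt
  simp only []
  rw [PySem.List.foldl_append_singleton_eq_map
    (fun i => ((PySem.List.pyGetD (pySplit i ",") 2 ""),
               playedMusicCalA (ConvertP (PySem.List.pyGetD (pySplit i ",") 3 ""))
                 (minReturnP (PySem.List.pyGetD (pySplit i ",") 0 "")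
                   (PySem.List.pyGetD (pySplit i ",") 1 ""))))]
  simp only [List.nil_append]
  have hB : musicinfos.foldl (fun st entry =>
      let temp := pySplit entry ","
      let played := playedMusicCalB (ConvertP (PySem.List.pyGetD temp 3 ""))
                      (minReturnP (PySem.List.pyGetD temp 0 "") (PySem.List.pyGetD temp 1 ""))
      if PySem.Str.isIn (ConvertP m) played && decide (st.2 < PySem.Str.len played)
      then (PySem.List.pyGetD temp 2 "", PySem.Str.len played) else st)
      (("(None)" : String), (-1 : Int))
    = (musicinfos.map
        (fun i => ((PySem.List.pyGetD (pySplit i ",") 2 ""),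
                   playedMusicCalA (ConvertP (PySem.List.pyGetD (pySplit i ",") 3 ""))
                     (minReturnP (PySem.List.pyGetD (pySplit i ",") 0 "")
                       (PySem.List.pyGetD (pySplit i ",") 1 ""))))).foldl
        (fun st p =>
          if PySem.Str.isIn (ConvertP m) p.2 && decide (st.2 < PySem.Str.len p.2)
          then (p.1, PySem.Str.len p.2) else st)
        (("(None)" : String), (-1 : Int)) := by
    rw [List.foldl_map]
    apply PySem.List.foldl_congr_mem
    intro acc x hx
    have hok : preOk x = true := by
      have := List.all_eq_true.mp hpre x hx
      simpa using this
    have hpe := played_eq (ConvertP (PySem.List.pyGetD (pySplit x ",") 3 ""))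
      (minReturnP (PySem.List.pyGetD (pySplit x ",") 0 "") (PySem.List.pyGetD (pySplit x ",") 1 ""))
      (preOk_played_hyp x hok)
    simp only []
    rw [hpe]
  rw [hB]
  exact main_list (fun x => PySem.Str.isIn (ConvertP m) x.2) _
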